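-- pv_equiv track=rewrite | github.com/matey97/Algoritmia | Entregable2/entregable2.py | cara_arriba
-- ===== SOURCE A (Python) =====
-- CARA = 'o'
--
-- CRUZ = 'x'
--
-- def cara_arriba (cadena_monedas):
--
--     def gira_bloque(lista, i):
--         aux = lista[:i]
--         aux.reverse()
--         for j, a in enumerate(aux):
--             if a==CRUZ:
--                 lista[j]=CARA
--             else:
--                 lista[j]=CRUZ
--
--     lista = []
--     res = []
--
--     for moneda in cadena_monedas:
--         lista.append(moneda)
--
--     for i, m in enumerate(lista): #Coste n*m --> Coste n bucle for + Coste m giraBloque(...)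
--         if not CRUZ in lista:
--             break
--         #Girar bloque si actual!=ultimo y actual!=siguiente o actual es el ultimo y es una cruz
--         if (i!=len(lista)-1 and m != lista[i+1]) or (i==len(lista)-1 and m==CRUZ):
--             gira_bloque(lista, i+1)
--             res.append(i+1)
--
--     return res
-- ===== SOURCE B (Python) =====
-- CARA = 'o'
--
-- CRUZ = 'x'
--
-- def cara_arriba(cadena_monedas):
--     # Single pass over the original string: each flip only touches positions
--     # already visited, so the flip condition reads original characters; the
--     # "no CRUZ left" early exit is tracked with two counters instead of
--     # scanning and rewriting the list.
--     s = cadena_monedas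
--     n = len(s)
--     res = []
--     cx_pre = 0              # CRUZ count in the (virtual) modified prefix
--     cx_suf = s.count(CRUZ)  # CRUZ count in the untouched suffix s[i:]
--     for i in range(n):
--         if cx_pre + cx_suf == 0:
--             break
--         isx = 1 if s[i] == CRUZ else 0
--         if (i != n - 1 and s[i] != s[i + 1]) or (i == n - 1 and s[i] == CRUZ):
--             res.append(i + 1)
--             cx_pre = (i + 1) - (cx_pre + isx)  # flipping block of length i+1
--         else:
--             cx_pre += isx
--         cx_suf -= isx
--     return res
-- ===== Notes on version B (the rewrite author's own statement) =====
-- stated objective: faster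
-- what changed: A repeatedly materialises, reverses and rewrites a prefix of the coin list on every flip; B makes a single pass over the original string, deciding each flip from two adjacent original characters and tracking the remaining-CRUZ early exit with two counters instead of rescanning and rewriting the list.
import Mathlib
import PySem

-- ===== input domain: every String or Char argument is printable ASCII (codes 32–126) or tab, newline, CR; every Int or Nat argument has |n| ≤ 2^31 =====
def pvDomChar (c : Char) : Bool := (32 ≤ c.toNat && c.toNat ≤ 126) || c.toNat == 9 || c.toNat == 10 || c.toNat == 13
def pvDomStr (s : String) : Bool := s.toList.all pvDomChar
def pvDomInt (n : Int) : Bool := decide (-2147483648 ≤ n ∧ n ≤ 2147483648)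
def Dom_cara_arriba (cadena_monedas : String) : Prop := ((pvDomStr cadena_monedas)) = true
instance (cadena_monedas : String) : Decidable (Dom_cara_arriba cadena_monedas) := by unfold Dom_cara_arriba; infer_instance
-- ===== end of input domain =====

-- B replaces A's quadratic list-rewriting flips by a single pass over the original
-- string with two CRUZ counters (objective: faster, asymptotic).

-- ===== PORT A =====
-- inner j-loop of gira_bloque: for j, a in enumerate(aux): lista[j] = CARA/CRUZ
def pvGiraGo (aux : List Char) (lista : List Char) (j : Nat) : List Char :=
  if h : j < aux.length then
    pvGiraGo aux (lista.set j (if aux[j] = 'x' then 'o' else 'x')) (j + 1)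
  else lista
termination_by aux.length - j

-- gira_bloque(lista, i): aux = reversed lista[:i]; overwrite lista[j] with flipped aux[j]
def pvGiraBloque (lista : List Char) (i : Nat) : List Char :=
  let aux := (PySem.List.slice lista none (some (i : Int))).reverse
  pvGiraGo aux lista 0

-- main loop: for i, m in enumerate(lista) with the 'not CRUZ in lista' break;
-- lista[i] / lista[i+1] are in range whenever read, so getD is exact here
def pvCaraGo (lista : List Char) (res : List Int) : List Nat → List Int
  | [] => res
  | i :: is =>
    if 'x' ∈ lista then
      let m := lista.getD i ' '
      if (i ≠ lista.length - 1 ∧ m ≠ lista.getD (i + 1) ' ') ∨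
         (i = lista.length - 1 ∧ m = 'x') then
        pvCaraGo (pvGiraBloque lista (i + 1)) (res ++ [(i : Int) + 1]) is
      else pvCaraGo lista res is
    else res

def cara_arriba (cadena_monedas : String) : List Int :=
  let lista := cadena_monedas.toList    -- for moneda in cadena_monedas: lista.append(moneda)
  pvCaraGo lista [] (List.range lista.length)

-- ===== PORT B =====
-- one pass; cp = CRUZ count of the (virtual) modified prefix, cs = CRUZ count of s[i:]
def pvAltGo (t : List Char) (n : Nat) (cp cs : Int) (res : List Int) : List Nat → List Int
  | [] => res
  | i :: is =>
    if cp + cs = 0 then res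
    else
      let isx : Int := if t.getD i ' ' = 'x' then 1 else 0
      if (i ≠ n - 1 ∧ t.getD i ' ' ≠ t.getD (i + 1) ' ') ∨
         (i = n - 1 ∧ t.getD i ' ' = 'x') then
        pvAltGo t n ((i : Int) + 1 - (cp + isx)) (cs - isx) (res ++ [(i : Int) + 1]) is
      else pvAltGo t n (cp + isx) (cs - isx) res is

def cara_arriba_alt (cadena_monedas : String) : List Int :=
  let t := cadena_monedas.toList
  -- s.count('x') with a one-character needle is the character count: exact
  pvAltGo t t.length 0 (t.count 'x' : Int) [] (List.range t.length)

-- ===== PRECONDITION & SPEC =====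
def Spec_cara_arriba (cadena_monedas : String) (out : List Int) : Prop := out = cara_arriba_alt cadena_monedas
instance (cadena_monedas : String) (out : List Int) : Decidable (Spec_cara_arriba cadena_monedas out) := by unfold Spec_cara_arriba; infer_instance

-- ===== CLAIM (what is proved, stated in full; the proofs are below) =====
def Claim_equal_cara_arriba : Prop := ∀ (cadena_monedas : String), Dom_cara_arriba cadena_monedas → Spec_cara_arriba cadena_monedas (cara_arriba cadena_monedas)

-- ===== LEMMAS AND PROOFS =====

theorem pvGiraGo_spec (aux : List Char) : ∀ (lista : List Char) (j : Nat),
    aux.length ≤ lista.length →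
    pvGiraGo aux lista j =
      lista.take j ++ ((aux.drop j).map (fun a => if a = 'x' then 'o' else 'x')) ++
        lista.drop (max j aux.length) := by
  intro lista j h
  induction lista, j using pvGiraGo.induct aux with
  | case1 lista j hj ih =>
    rw [pvGiraGo, dif_pos hj]
    simp only [dite_eq_ite] at ih
    rw [ih (by simpa using h)]
    have hjl : j < lista.length := lt_of_lt_of_le hj h
    rw [List.set_eq_take_cons_drop _ hjl]
    have hd : aux.drop j = aux[j] :: aux.drop (j+1) := List.drop_eq_getElem_cons hj
    rw [List.take_append, List.drop_append]
    have hlt : (List.take j lista).length = j := by simp; omega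
    have hmax1 : max (j+1) aux.length = aux.length := by omega
    have hmax2 : max j aux.length = aux.length := by omega
    rw [hlt, hmax1, hmax2]
    have h1 : j + 1 - j = 1 := by omega
    have h2 : aux.length - j = (aux.length - (j+1)) + 1 := by omega
    rw [List.take_of_length_le (by rw [hlt]; omega), h1, h2, hd]
    have e1 : List.drop aux.length (List.take j lista) = [] :=
      List.drop_eq_nil_of_le (by rw [hlt]; omega)
    have e2 : j + 1 + (aux.length - (j+1)) = aux.length := by omega
    simp only [e1, List.map_drop]
    simp [List.drop_drop, e2]
    rw [← List.map_drop, ← List.map_drop, hd]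
    simp only [List.map_cons, List.cons_append]
  | case2 lista j hj =>
    rw [pvGiraGo, dif_neg hj]
    have hle : aux.length ≤ j := by omega
    rw [List.drop_eq_nil_of_le hle, Nat.max_eq_left hle]
    simp [List.take_append_drop]

theorem count_map_flip (l : List Char) :
    (l.map (fun a => if a = 'x' then 'o' else 'x')).count 'x' = l.length - l.count 'x' := by
  induction l with
  | nil => simp
  | cons a l ih =>
    have hc : List.count 'x' l ≤ l.length := List.count_le_length
    by_cases h : a = 'x' <;>
      simp [h, ih] <;> omega

theorem pvGiraBloque_spec (P rest : List Char) (c : Char) :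
    pvGiraBloque (P ++ c :: rest) (P.length + 1) =
      ((P ++ [c]).reverse.map (fun a => if a = 'x' then 'o' else 'x')) ++ rest := by
  unfold pvGiraBloque
  have hs : PySem.List.slice (P ++ c :: rest) none (some ((P.length + 1 : Nat) : Int))
      = P ++ [c] := by
    rw [PySem.List.slice_to_natCast]
    rw [List.take_append, List.take_of_length_le (by omega)]
    congr 1
    simp
  rw [hs]
  rw [pvGiraGo_spec _ _ 0 (by simp)]
  simp [List.drop_append]

theorem pvMain (t : List Char) : ∀ (rest P : List Char) (res : List Int),
    P.length + rest.length = t.length → t.drop P.length = rest →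
    pvCaraGo (P ++ rest) res (List.range' P.length rest.length) =
      pvAltGo t t.length (P.count 'x' : Int) (rest.count 'x' : Int) res
        (List.range' P.length rest.length) := by
  intro rest
  induction rest with
  | nil => intro P res _ _; simp [pvCaraGo, pvAltGo]
  | cons c rest ih =>
    intro P res hlen hdrop
    have hkle : P.length ≤ t.length := by simp at hlen; omega
    have htt : t = t.take P.length ++ c :: rest := by
      conv_lhs => rw [← List.take_append_drop P.length t, hdrop]
    have hQ : (t.take P.length).length = P.length := by simp; omega
    have hl : (P ++ c :: rest).length = t.length := by simp at hlen ⊢; omega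
    have hm : (P ++ c :: rest).getD P.length ' ' = c := by
      rw [List.getD_append_right _ _ _ _ le_rfl]; simp
    have hm2 : (P ++ c :: rest).getD (P.length + 1) ' ' = rest.getD 0 ' ' := by
      rw [List.getD_append_right _ _ _ _ (by omega)]
      simp [List.getD]
    have ht : t.getD P.length ' ' = c := by
      conv_lhs => rw [htt]
      rw [List.getD_append_right _ _ _ _ (le_of_eq hQ)]; simp [hQ]
    have ht2 : t.getD (P.length + 1) ' ' = rest.getD 0 ' ' := by
      conv_lhs => rw [htt]
      rw [List.getD_append_right _ _ _ _ (by rw [hQ]; omega)]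
      simp [hQ, List.getD]
    have hrange : List.range' P.length (c :: rest).length =
        P.length :: List.range' (P.length + 1) rest.length := by simp [List.range'_succ]
    have hcnt : ((c :: rest).count 'x' : Int) =
        (if c = 'x' then 1 else 0) + (rest.count 'x' : Int) := by
      by_cases h : c = 'x' <;> simp [h] <;> omega
    rw [hrange]
    rw [pvCaraGo, pvAltGo]
    by_cases hx : 'x' ∈ P ++ c :: rest
    · have hxz : ¬((P.count 'x' : Int) + ((c :: rest).count 'x' : Int) = 0) := by
        have hpos := List.count_pos_iff.mpr hx
        rw [List.count_append] at hpos
        omega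
      rw [if_pos hx, if_neg hxz]
      rw [hm, hm2, hl, ht, ht2]
      by_cases hc : (P.length ≠ t.length - 1 ∧ c ≠ rest.getD 0 ' ') ∨
          (P.length = t.length - 1 ∧ c = 'x')
      · rw [if_pos hc, if_pos hc]
        have hgb : pvGiraBloque (P ++ c :: rest) (P.length + 1) =
            ((P ++ [c]).reverse.map (fun a => if a = 'x' then 'o' else 'x')) ++ rest :=
          pvGiraBloque_spec P rest c
        rw [hgb]
        set P' := (P ++ [c]).reverse.map (fun a => if a = 'x' then 'o' else 'x') with hP'
        have hlen' : P'.length = P.length + 1 := by simp [hP']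
        have hdrop' : t.drop P'.length = rest := by
          rw [hlen', ← List.drop_drop, hdrop]; rfl
        have hih := ih P' (res ++ [(P.length : Int) + 1])
          (by simp at hlen ⊢; omega) hdrop'
        rw [hlen'] at hih
        rw [hih]
        congr 1
        · -- counts of flipped prefix
          have : P'.count 'x' = (P.length + 1) - (P ++ [c]).count 'x' := by
            rw [hP', count_map_flip, List.count_reverse, List.length_reverse]
            simp
          have h1 : (P ++ [c]).count 'x' = P.count 'x' + if c = 'x' then 1 else 0 := by
            by_cases h : c = 'x' <;> simp [List.count_append, h]
          have h2 : (P ++ [c]).count 'x' ≤ P.length + 1 := by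
            simpa using List.count_le_length (a := 'x') (l := P ++ [c])
          rw [this]
          by_cases h : c = 'x' <;> simp [h] at h1 h2 ⊢ <;> omega
        · rw [hcnt]; by_cases h : c = 'x' <;> simp [h]
      · rw [if_neg hc, if_neg hc]
        have hass : P ++ c :: rest = (P ++ [c]) ++ rest := by simp
        have hih := ih (P ++ [c]) res
          (by simp at hlen ⊢; omega)
          (by rw [List.length_append, List.length_cons, List.length_nil, ← List.drop_drop, hdrop]; rfl)
        rw [List.length_append, List.length_cons, List.length_nil] at hih
        rw [hass, hih]
        congr 1
        · have h1 : (P ++ [c]).count 'x' = P.count 'x' + if c = 'x' then 1 else 0 := by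
            by_cases h : c = 'x' <;> simp [List.count_append, h]
          rw [h1]; by_cases h : c = 'x' <;> simp [h]
        · rw [hcnt]; by_cases h : c = 'x' <;> simp [h]
    · have hxz : (P.count 'x' : Int) + ((c :: rest).count 'x' : Int) = 0 := by
        have hz : List.count 'x' (P ++ c :: rest) = 0 := by
          rw [List.count_eq_zero]; exact hx
        rw [List.count_append] at hz
        omega
      rw [if_neg hx, if_pos hxz]

-- ===== VERDICT (by name: the statement is the Claim_ definition above) =====
theorem cara_arriba_spec : Claim_equal_cara_arriba := by
  intro s _
  unfold Spec_cara_arriba cara_arriba cara_arriba_alt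
  have h := pvMain s.toList s.toList [] [] (by simp) (by simp)
  simpa [List.range_eq_range'] using h
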